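-- pv_equiv track=rewrite | github.com/nirajannepal/csv2parquet | csv2parquet/overwritingCsv2Parquet.py | getParquetOutputFileName
-- ===== SOURCE A (Python) =====
-- def stripCSVExtension(fileName):
--     return fileName.replace(".csv", "")
--
-- def getParquetOutputFileName(csvFilePath):
--     # csvFile = "C:/Users/nirajan.nepal/Desktop/talend/db/airlines/forarc/output.csv";
--     csvFile = csvFilePath;
--
--     parquetFileItems = csvFile.split("/");
--
--     # construct output folder
--     parquestOutputFolder = "";
--     for index in range((len(parquetFileItems) - 1)): # iterate upto C:/Users/nirajan.nepal/Desktop/talend/db/airlines/forarc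
--         parquestOutputFolder += parquetFileItems[index] + "/"
--     parquestOutputFolder += "output" # creates output file named C:/Users/nirajan.nepal/Desktop/talend/db/airlines/forarc/output
--
--     parquestOutputFile = parquestOutputFolder + "/" + stripCSVExtension(parquetFileItems[-1]) + ".parquet" #adds extension C:/Users/nirajan.nepal/Desktop/talend/db/airlines/forarc/output.parquet
--     return parquestOutputFile;
-- ===== SOURCE B (Python) =====
-- def getParquetOutputFileName(csvFilePath):
--     head, sep, tail = csvFilePath.rpartition("/")
--     folder = head + sep + "output"
--     return folder + "/" + tail.replace(".csv", "") + ".parquet"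
-- ===== Notes on version B (the rewrite author's own statement) =====
-- stated objective: idiomatic
-- what changed: Replaces split-into-a-list plus an index loop that re-concatenates the leading components with a single rpartition at the last separator, so no component list is built and no loop runs.
import Mathlib
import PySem

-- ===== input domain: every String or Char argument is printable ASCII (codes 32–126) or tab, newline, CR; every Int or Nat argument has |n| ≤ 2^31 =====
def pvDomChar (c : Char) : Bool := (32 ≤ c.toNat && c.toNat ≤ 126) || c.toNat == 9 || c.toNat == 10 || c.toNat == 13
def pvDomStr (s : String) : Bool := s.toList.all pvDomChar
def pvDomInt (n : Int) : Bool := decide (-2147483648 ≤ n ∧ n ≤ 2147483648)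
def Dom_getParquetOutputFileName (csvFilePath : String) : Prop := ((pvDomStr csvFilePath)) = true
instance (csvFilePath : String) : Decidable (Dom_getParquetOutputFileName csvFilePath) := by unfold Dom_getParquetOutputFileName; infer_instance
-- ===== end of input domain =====

-- B replaces A's split-into-components + index loop by a single rpartition at the last separator; objective: idiomatic.


-- ===== PORT A =====
def stripCSVExtension (fileName : String) : String := PySem.Str.replace fileName ".csv" ""

def getParquetOutputFileName (csvFilePath : String) : String :=
  let csvFile := csvFilePath
  -- csvFile.split("/"): the separator "/" is nonempty, so split? is always some
  let parquetFileItems := (PySem.Str.split? csvFile "/").getD []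
  -- for index in range(len(items) - 1): folder += items[index] + "/"  (indices always in range)
  let parquestOutputFolder :=
    (PySem.List.pyRange 0 ((parquetFileItems.length : Int) - 1) 1).foldl
      (fun acc index => acc ++ PySem.List.pyGetD parquetFileItems index "" ++ "/") ""
  let parquestOutputFolder := parquestOutputFolder ++ "output"
  parquestOutputFolder ++ "/" ++ stripCSVExtension (PySem.List.pyGetD parquetFileItems (-1) "") ++ ".parquet"

-- ===== PORT B =====
-- hand port of str.rpartition on the separator (exact: splits at its last occurrence; empty head and sep when absent)
def rpartSlash : List Char → List Char × List Char × List Char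
  | [] => ([], [], [])
  | c :: rest =>
    if '/' ∈ rest then ((c :: (rpartSlash rest).1), (rpartSlash rest).2.1, (rpartSlash rest).2.2)
    else if c = '/' then ([], ['/'], rest)
    else ([], [], c :: rest)

def getParquetOutputFileName_alt (csvFilePath : String) : String :=
  let p := rpartSlash csvFilePath.toList
  let folder := String.ofList p.1 ++ String.ofList p.2.1 ++ "output"
  folder ++ "/" ++ PySem.Str.replace (String.ofList p.2.2) ".csv" "" ++ ".parquet"

-- ===== PRECONDITION & SPEC =====
def Spec_getParquetOutputFileName (csvFilePath : String) (out : String) : Prop := out = getParquetOutputFileName_alt csvFilePath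
instance (csvFilePath : String) (out : String) : Decidable (Spec_getParquetOutputFileName csvFilePath out) := by unfold Spec_getParquetOutputFileName; infer_instance

-- ===== CLAIM (what is proved, stated in full; the proofs are below) =====
def Claim_equal_getParquetOutputFileName : Prop := ∀ (csvFilePath : String), Dom_getParquetOutputFileName csvFilePath → Spec_getParquetOutputFileName csvFilePath (getParquetOutputFileName csvFilePath)

-- ===== LEMMAS AND PROOFS =====

-- functional model of Python's split on "/"
def splitSlash : List Char → List (List Char)
  | [] => [[]]
  | c :: rest =>
    if c = '/' then [] :: splitSlash rest
    else match splitSlash rest with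
      | [] => [[c]]
      | h :: t => (c :: h) :: t

theorem splitSlash_ne_nil (cs : List Char) : splitSlash cs ≠ [] := by
  cases cs with
  | nil => simp [splitSlash]
  | cons c rest =>
    simp only [splitSlash]
    split
    · simp
    · split <;> simp

def joinParts (ps : List (List Char)) : List Char := (ps.map (fun p => p ++ ['/'])).flatten

theorem splitOn_go_eq (fuel : Nat) (l cur : List Char) (acc : List (List Char))
    (h : l.length < fuel) :
    PySem.Chars.splitOn.go ['/'] fuel l cur acc =
      acc.reverse ++ (match splitSlash l with
                      | [] => [cur.reverse]
                      | hd :: t => (cur.reverse ++ hd) :: t) := by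
  induction fuel generalizing l cur acc with
  | zero => omega
  | succ n ih =>
    cases l with
    | nil =>
      simp [PySem.Chars.splitOn.go, splitSlash]
    | cons c rest =>
      rw [PySem.Chars.splitOn.go]
      by_cases hc : c = '/'
      · subst hc
        rw [if_pos (by simp)]
        simp only [List.length_singleton, List.drop_succ_cons, List.drop_zero]
        rw [ih rest [] (cur.reverse :: acc) (by simp at h; omega)]
        have hne := splitSlash_ne_nil rest
        cases hps : splitSlash rest with
        | nil => exact absurd hps hne
        | cons hd t => simp [splitSlash, hps]
      · have hp : List.isPrefixOf ['/'] (c :: rest) = false := by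
          simp [List.isPrefixOf]; intro hh; exact hc hh.symm
        rw [if_neg (by simp [hp])]
        rw [ih rest (c :: cur) acc (by simp at h; omega)]
        cases hps : splitSlash rest with
        | nil => exact absurd hps (splitSlash_ne_nil rest)
        | cons hd t => simp [splitSlash, hps, hc]

theorem splitOn_eq (cs : List Char) :
    PySem.Chars.splitOn cs ['/'] = splitSlash cs := by
  rw [PySem.Chars.splitOn, splitOn_go_eq (cs.length + 1) cs [] [] (by omega)]
  cases hps : splitSlash cs with
  | nil => exact absurd hps (splitSlash_ne_nil cs)
  | cons hd t => simp

theorem noSlash_splitSlash {cs : List Char} (h : '/' ∉ cs) : splitSlash cs = [cs] := by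
  induction cs with
  | nil => simp [splitSlash]
  | cons c rest ih =>
    simp only [List.mem_cons, not_or] at h
    simp [splitSlash, Ne.symm h.1, ih h.2]

theorem hasSlash_len {cs : List Char} (h : '/' ∈ cs) : 2 ≤ (splitSlash cs).length := by
  induction cs with
  | nil => simp at h
  | cons c rest ih =>
    by_cases hc : c = '/'
    · subst hc
      rw [splitSlash, if_pos rfl]
      have : 1 ≤ (splitSlash rest).length := List.length_pos_of_ne_nil (splitSlash_ne_nil rest)
      simp only [List.length_cons]
      omega
    · have hm : '/' ∈ rest := by rcases List.mem_cons.mp h with h1 | h2; exact absurd h1.symm hc; exact h2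
      have := ih hm
      simp only [splitSlash, if_neg hc]
      cases hps : splitSlash rest with
      | nil => exact absurd hps (splitSlash_ne_nil rest)
      | cons hd t => rw [hps] at this; simpa using this

theorem main_lemma (cs : List Char) :
    joinParts ((splitSlash cs).dropLast) = (rpartSlash cs).1 ++ (rpartSlash cs).2.1 ∧
    (splitSlash cs).getLastD [] = (rpartSlash cs).2.2 := by
  induction cs with
  | nil => simp [splitSlash, rpartSlash, joinParts]
  | cons c rest ih =>
    by_cases hm : '/' ∈ rest
    · rw [rpartSlash, if_pos hm]
      cases hps : splitSlash rest with
      | nil => exact absurd hps (splitSlash_ne_nil rest)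
      | cons hd t =>
        have hlen := hasSlash_len hm
        rw [hps] at hlen
        cases t with
        | nil => simp at hlen
        | cons t0 ts =>
          rw [hps] at ih
          by_cases hc : c = '/'
          · subst hc
            simp only [splitSlash, hps]
            refine ⟨?_, by simpa using ih.2⟩
            simp [joinParts] at ih ⊢
            simp [ih.1]
          · simp only [splitSlash, if_neg hc, hps]
            refine ⟨?_, by simpa using ih.2⟩
            simp [joinParts] at ih ⊢
            simp [ih.1]
    · have hrest := noSlash_splitSlash hm
      rw [rpartSlash, if_neg hm]
      by_cases hc : c = '/'
      · subst hc
        simp [splitSlash, hrest, joinParts]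
      · simp [splitSlash, hc, hrest, joinParts]

theorem items_eq (s : String) :
    (PySem.Str.split? s "/").getD [] = (splitSlash s.toList).map String.ofList := by
  simp [PySem.Str.split?, PySem.Chars.split?, splitOn_eq]

theorem getLast_eq_getLastD'' {α : Type} (xs : List α) (h : xs ≠ []) (d : α) :
    xs.getLast h = xs.getLastD d := by
  cases xs with
  | nil => exact absurd rfl h
  | cons a l => rw [List.getLast_eq_getLastD, List.getLastD_cons]

theorem ofList_slash : String.ofList ['/'] = "/" := rfl

theorem foldl_join (ps : List (List Char)) (init : String) :
    (ps.map String.ofList).foldl (fun a x => a ++ x ++ "/") init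
      = init ++ String.ofList (joinParts ps) := by
  induction ps generalizing init with
  | nil => simp [joinParts]
  | cons h t ih =>
    simp only [List.map_cons, List.foldl_cons, ih, joinParts, List.flatten_cons]
    have hc : String.ofList ('/' :: (List.map (fun p => p ++ ['/']) t).flatten)
        = "/" ++ String.ofList (List.map (fun p => p ++ ['/']) t).flatten := by
      rw [show ('/' :: (List.map (fun p => p ++ ['/']) t).flatten)
            = ['/'] ++ (List.map (fun p => p ++ ['/']) t).flatten from rfl,
          String.ofList_append, ofList_slash]
    simp [String.ofList_append, String.append_assoc, hc]

theorem final (s : String) : getParquetOutputFileName s = getParquetOutputFileName_alt s := by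
  unfold getParquetOutputFileName getParquetOutputFileName_alt stripCSVExtension
  dsimp only
  rw [items_eq]
  set ps := splitSlash s.toList with hps
  have hne : ps ≠ [] := splitSlash_ne_nil s.toList
  have hlen : 1 ≤ ps.length := List.length_pos_of_ne_nil hne
  have hlen' : ((ps.map String.ofList).length : Int) - 1
      = (((ps.map String.ofList).dropLast).length : Int) := by
    simp [List.length_dropLast]; omega
  rw [hlen']
  rw [PySem.List.foldl_congr_mem _ _
      (fun acc index => acc ++ PySem.List.pyGetD ((ps.map String.ofList).dropLast) index "" ++ "/") _
      (by
        intro acc x hx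
        rw [PySem.List.mem_pyRange_one] at hx
        have h0 : (0:Int) ≤ x := hx.1
        have h1 : x < (((ps.map String.ofList).dropLast).length : Int) := by
          simpa using hx.2
        dsimp only
        rw [PySem.List.pyGetD_eq_getElem ((ps.map String.ofList).dropLast) "" h0 h1,
            PySem.List.pyGetD_eq_getElem (ps.map String.ofList) "" h0 (by simp at h1 ⊢; omega),
            List.getElem_dropLast])]
  rw [PySem.List.foldl_pyRange_zero_pyGetD' ((ps.map String.ofList).dropLast) ""
      (fun a x => a ++ x ++ "/") ""]
  rw [← List.map_dropLast, foldl_join]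
  have h1 := (main_lemma s.toList).1
  have h2 := (main_lemma s.toList).2
  rw [← hps] at h1 h2
  rw [PySem.List.pyGetD_neg_one _ _ (by simpa using hne)]
  rw [List.getLast_map, getLast_eq_getLastD'' _ _ ([] : List Char), h2, h1]
  simp [String.ofList_append, String.append_assoc]

-- ===== VERDICT (by name: the statement is the Claim_ definition above) =====
theorem getParquetOutputFileName_spec : Claim_equal_getParquetOutputFileName := by
  intro s _
  unfold Spec_getParquetOutputFileName
  exact final s
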